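-- pv_equiv track=rewrite | github.com/ekohilas/google-kickstart-2017 | round_f/a/io.py | worst_case
-- ===== SOURCE A (Python) =====
-- def worst_case(n, l):
--     s_l = sorted(l)
--
--     mid = l.pop((n-1)//2)
--     while l:
--         if mid == s_l[0]:
--             s_l.pop(0)
--         elif mid == s_l[-1]:
--             s_l.pop()
--         else:
--             return "NO"
--         mid = l.pop((len(l)-1)//2)
--
--     return "YES"
-- ===== SOURCE B (Python) =====
-- def _inter(x, y):
--     # alternate x0, y0, x1, y1, ...; the longer list's tail is appended
--     out = []
--     for a, b in zip(x, y):
--         out.append(a)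
--         out.append(b)
--     k = min(len(x), len(y))
--     return out + (x[k:] or y[k:])
--
--
-- def worst_case(n, l):
--     # Does not mutate l (A empties it); equivalence is about the return value.
--     s = sorted(l)
--     c = list(l)
--     first = c.pop((n - 1) // 2)          # same IndexError behaviour as A's first pop
--     # removal order of repeatedly popping index (len-1)//2: middle, then
--     # alternating outward (left first for odd length, right first for even)
--     if c:
--         mid = (len(c) - 1) // 2
--         L = c[:mid][::-1]
--         R = c[mid + 1:]
--         rest = _inter(L, R) if len(c) % 2 else _inter(R, L)
--         mids = [first, c[mid]] + rest
--     else: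
--         mids = [first]
--     lo, hi = 0, len(s) - 1
--     for v in mids[:-1]:                  # the last popped value is never checked
--         if v == s[lo]:
--             lo += 1
--         elif v == s[hi]:
--             hi -= 1
--         else:
--             return "NO"
--     return "YES"
-- ===== Notes on version B (the rewrite author's own statement) =====
-- stated objective: faster
-- what changed: Instead of simulating the process (repeatedly popping the middle of l in place and popping the ends of the sorted copy), B computes the removal order in closed form (middle element, then alternating outward, built from two slices by interleaving) and verifies it in one pass with two pointers into the sorted list.
import Mathlib
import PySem

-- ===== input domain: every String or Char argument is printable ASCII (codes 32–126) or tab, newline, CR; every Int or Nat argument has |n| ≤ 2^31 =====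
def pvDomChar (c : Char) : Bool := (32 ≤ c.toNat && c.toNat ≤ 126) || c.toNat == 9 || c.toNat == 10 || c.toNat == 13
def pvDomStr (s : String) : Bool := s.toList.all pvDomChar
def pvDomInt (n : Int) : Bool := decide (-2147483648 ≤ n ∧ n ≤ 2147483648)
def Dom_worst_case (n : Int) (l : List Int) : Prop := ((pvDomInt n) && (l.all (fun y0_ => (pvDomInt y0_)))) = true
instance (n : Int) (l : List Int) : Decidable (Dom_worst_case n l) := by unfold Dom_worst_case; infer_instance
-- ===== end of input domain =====

-- B replaces A's quadratic simulation (repeated middle pops of l and end pops of s_l) by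
-- computing the removal order in closed form (middle, then alternating outward) and a single
-- two-pointer pass over the sorted list.  A empties l in place; B does not mutate l, and the
-- equivalence proved here is about the return value only.

-- ===== PORT A =====
def worstCaseLoopA : Nat → List Int → List Int → Int → String
  | 0, _, _, _ => ""                                   -- fuel exhaustion, unreachable
  | fuel + 1, l, s_l, mid =>
    if l = [] then "YES"
    else
      match s_l with
      | [] => ""                                       -- s_l[0] raises IndexError, unreachable
      | a :: rest =>
        if mid = a then
          match PySem.List.pop? l (PySem.Int.floordiv ((l.length : Int) - 1) 2) with
          | none => ""                                 -- unreachable: l ≠ []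
          | some (mid', l') => worstCaseLoopA fuel l' rest mid'
        else if some mid = (a :: rest).getLast? then
          match PySem.List.pop? l (PySem.Int.floordiv ((l.length : Int) - 1) 2) with
          | none => ""                                 -- unreachable: l ≠ []
          | some (mid', l') => worstCaseLoopA fuel l' ((a :: rest).dropLast) mid'
        else "NO"

def worst_case (n : Int) (l : List Int) : String :=
  let s_l := PySem.List.sorted l (fun x => x) false
  match PySem.List.pop? l (PySem.Int.floordiv (n - 1) 2) with
  | none => ""                                         -- IndexError on the first pop; excluded by Pre_
  | some (mid, l') => worstCaseLoopA (l'.length + 1) l' s_l mid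

-- ===== PORT B =====
-- _inter of Source B: alternate x0, y0, x1, y1, …, then the longer list's tail
def interZ (x y : List Int) : List Int :=
  let out := (x.zip y).flatMap (fun p => [p.1, p.2])
  let k := min x.length y.length
  out ++ (if x.drop k = [] then y.drop k else x.drop k)

def wcMids (first : Int) (cs : List Int) : List Int :=
  if cs = [] then [first]
  else
    let mid := (cs.length - 1) / 2
    match PySem.List.pyGet? cs (mid : Int) with
    | none => []                                       -- unreachable: mid < cs.length
    | some cm =>
      let L := (cs.take mid).reverse
      let R := cs.drop (mid + 1)
      let rest := if cs.length % 2 = 1 then interZ L R else interZ R L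
      first :: cm :: rest

def wcBLoop : List Int → List Int → Int → Int → String
  | [], _, _, _ => "YES"
  | v :: vs, s, lo, hi =>
    match PySem.List.pyGet? s lo with
    | none => ""                                       -- unreachable: lo stays in range
    | some a =>
      if v = a then wcBLoop vs s (lo + 1) hi
      else
        match PySem.List.pyGet? s hi with
        | none => ""                                   -- unreachable: hi stays in range
        | some b => if v = b then wcBLoop vs s lo (hi - 1) else "NO"

def worst_case_alt (n : Int) (l : List Int) : String :=
  let s := PySem.List.sorted l (fun x => x) false
  match PySem.List.pop? l (PySem.Int.floordiv (n - 1) 2) with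
  | none => ""                                         -- same IndexError as A; excluded by Pre_
  | some (first, cs) =>
    wcBLoop (wcMids first cs).dropLast s 0 ((s.length : Int) - 1)

-- ===== PRECONDITION & SPEC =====
-- Pre_ excludes exactly the inputs on which A raises IndexError: the empty list, and a first
-- pop index (n-1)//2 outside Python's pop range.
def Pre_worst_case (n : Int) (l : List Int) : Prop :=
  l ≠ [] ∧ PySem.Raise.InRange l.length (PySem.Int.floordiv (n - 1) 2)

instance (n : Int) (l : List Int) : Decidable (Pre_worst_case n l) := by
  unfold Pre_worst_case PySem.Raise.InRange; infer_instance

def pvWitness_worst_case : Int × List Int := (3, [2, 1, 3])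

def Spec_worst_case (n : Int) (l : List Int) (out : String) : Prop := out = worst_case_alt n l
instance (n : Int) (l : List Int) (out : String) : Decidable (Spec_worst_case n l out) := by
  unfold Spec_worst_case; infer_instance

-- ===== CLAIM (what is proved, stated in full; the proofs are below) =====
def Claim_equal_worst_case : Prop :=
  ∀ (n : Int) (l : List Int), Dom_worst_case n l → Pre_worst_case n l →
    Spec_worst_case n l (worst_case n l)

-- ===== LEMMAS AND PROOFS =====

-- the sequence of values popped by repeatedly popping index (len-1)//2 (A's rule)
def midsRec (l : List Int) : List Int :=
  if h : l = [] then []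
  else
    have hm : (l.length - 1) / 2 < l.length := by
      cases l with
      | nil => simp at h
      | cons a t => simp; omega
    l[(l.length - 1) / 2]'hm :: midsRec (l.eraseIdx ((l.length - 1) / 2))
termination_by l.length
decreasing_by
  simp [List.length_eraseIdx, hm]
  omega

-- recursive interleaving (proof-side normal form of interZ)
def interR : List Int → List Int → List Int
  | [], ys => ys
  | x :: xs, ys => x :: interR ys xs
termination_by xs ys => xs.length + ys.length
decreasing_by simp; omega

-- B's closed-form removal order, phrased with interR
def midsB (cs : List Int) : List Int :=
  if h : cs = [] then []
  else
    have hm : (cs.length - 1) / 2 < cs.length := by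
      cases cs with
      | nil => simp at h
      | cons a t => simp; omega
    cs[(cs.length - 1) / 2]'hm ::
      (if cs.length % 2 = 1 then
        interR ((cs.take ((cs.length - 1) / 2)).reverse) (cs.drop ((cs.length - 1) / 2 + 1))
      else
        interR (cs.drop ((cs.length - 1) / 2 + 1)) ((cs.take ((cs.length - 1) / 2)).reverse))

-- A's evolving check, with the sorted remainder as an explicit segment
def checkSeq : List Int → List Int → String
  | [], _ => "YES"
  | v :: vs, seg =>
    match seg with
    | [] => ""
    | a :: rest =>
      if v = a then checkSeq vs rest
      else if some v = (a :: rest).getLast? then checkSeq vs ((a :: rest).dropLast)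
      else "NO"

theorem pop?_mid (xs : List Int) (h : xs ≠ []) :
    PySem.List.pop? xs (PySem.Int.floordiv ((xs.length : Int) - 1) 2)
      = some (xs[(xs.length - 1) / 2]'(by cases xs with | nil => simp at h | cons a t => simp; omega),
              xs.eraseIdx ((xs.length - 1) / 2)) := by
  have hl : 1 ≤ xs.length := List.length_pos_iff.mpr h
  have h1 : ((xs.length : Int) - 1) = ((xs.length - 1 : Nat) : Int) := by omega
  have h2 : PySem.Int.floordiv ((xs.length - 1 : Nat) : Int) 2
      = (((xs.length - 1) / 2 : Nat) : Int) := by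
    exact_mod_cast PySem.Int.floordiv_natCast (xs.length - 1) 2
  rw [h1, h2, PySem.List.pop?_natCast]

theorem loopA_eq (fuel : Nat) (l s_l : List Int) (mid : Int) (hf : l.length < fuel) :
    worstCaseLoopA fuel l s_l mid = checkSeq ((mid :: midsRec l).dropLast) s_l := by
  induction fuel generalizing l s_l mid with
  | zero => omega
  | succ fuel ih =>
    by_cases hl : l = []
    · subst hl
      simp [worstCaseLoopA, midsRec, checkSeq]
    · have hk : (l.length - 1) / 2 < l.length := by
        cases l with
        | nil => simp at hl
        | cons a t => simp; omega
      have hlen' : (l.eraseIdx ((l.length - 1) / 2)).length = l.length - 1 := by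
        simp [List.length_eraseIdx, hk]
      have hmr : midsRec l
          = l[(l.length - 1) / 2]'hk :: midsRec (l.eraseIdx ((l.length - 1) / 2)) := by
        rw [midsRec]; simp [hl]
      rw [worstCaseLoopA.eq_def]
      simp only [hl, if_false]
      cases s_l with
      | nil =>
        rw [hmr, List.dropLast_cons_of_ne_nil (by simp)]
        rfl
      | cons a rest =>
        rw [hmr, List.dropLast_cons_of_ne_nil (by simp), pop?_mid l hl]
        show (if mid = a then _ else _) = checkSeq _ (a :: rest)
        rw [checkSeq]
        split_ifs with hc1 hc2
        · exact ih _ _ _ (by omega)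
        · exact ih _ _ _ (by omega)
        · rfl

theorem interZ_eq_interR (x y : List Int) : interZ x y = interR x y := by
  induction x generalizing y with
  | nil => simp [interZ, interR]
  | cons a xs ih =>
    cases y with
    | nil => simp [interZ, interR]
    | cons b ys =>
      have h1 : interZ (a :: xs) (b :: ys) = a :: b :: interZ xs ys := by
        simp [interZ, Nat.succ_min_succ]
      rw [h1, interR, interR, ih]

theorem midsB_step (cs : List Int) (h : cs ≠ []) :
    midsB cs = cs[(cs.length - 1) / 2]'(by cases cs with | nil => simp at h | cons a t => simp; omega)
      :: midsB (cs.eraseIdx ((cs.length - 1) / 2)) := by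
  have hm1 : 1 ≤ cs.length := List.length_pos_iff.mpr h
  rcases Nat.lt_or_ge cs.length 2 with h2 | h2
  · match cs, h with
    | [a], _ => simp [midsB, interR]
    | a :: b :: t, _ => simp at h2
  · rcases Nat.even_or_odd cs.length with ⟨t, ht⟩ | ⟨t, ht⟩
    · -- even length 2t, t ≥ 1, mid = t-1
      have hlt : t - 1 ≤ cs.length := by omega
      have hlA : (cs.take (t-1)).length = t - 1 := by simp; omega
      have hmid : (cs.length - 1) / 2 = t - 1 := by omega
      have hsucc : t - 1 + 1 = t := by omega
      have her : cs.eraseIdx ((cs.length - 1) / 2) = cs.take (t - 1) ++ cs.drop t := by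
        rw [hmid, List.eraseIdx_eq_take_drop_succ, hsucc]
      have hlen' : (cs.take (t - 1) ++ cs.drop t).length = t + t - 1 := by
        simp; omega
      have hne' : cs.take (t - 1) ++ cs.drop t ≠ [] := by
        intro hx
        rw [← List.length_eq_zero_iff] at hx
        omega
      have hB : cs.drop t = cs[t]'(by omega) :: cs.drop (t + 1) :=
        List.drop_eq_getElem_cons (by omega)
      have hmid' : ((cs.take (t - 1) ++ cs.drop t).length - 1) / 2 = t - 1 := by
        rw [hlen']; omega
      have hg1 : (cs.take (t - 1) ++ cs.drop t)[t - 1]'(by rw [hlen']; omega) = cs[t]'(by omega) := by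
        rw [List.getElem_append_right (by rw [hlA])]
        simp [hlA]
      have hg3 : (cs.take (t - 1) ++ cs.drop t).take (t - 1) = cs.take (t - 1) := by
        rw [List.take_append_of_le_length (by rw [hlA]), List.take_take, Nat.min_self]
      have hg4 : (cs.take (t - 1) ++ cs.drop t).drop t = cs.drop (t + 1) := by
        rw [List.drop_append, hlA]
        have e1 : List.drop t (List.take (t - 1) cs) = [] :=
          List.drop_eq_nil_of_le (by rw [hlA]; omega)
        have e2 : t - (t - 1) = 1 := by omega
        rw [e1, e2, List.nil_append, List.drop_drop]
      rw [her, midsB, midsB]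
      simp only [dif_neg h, dif_neg hne', hmid, hmid', hsucc]
      rw [if_neg (by omega : ¬ cs.length % 2 = 1),
          if_pos (by rw [hlen']; omega : (cs.take (t - 1) ++ cs.drop t).length % 2 = 1)]
      rw [hg1, hg3, hg4, hB, interR]
    · -- odd length 2t+1, t ≥ 1, mid = t
      have htt : 1 ≤ t := by omega
      have hlA : (cs.take t).length = t := by simp; omega
      have hmid : (cs.length - 1) / 2 = t := by omega
      have her : cs.eraseIdx ((cs.length - 1) / 2) = cs.take t ++ cs.drop (t + 1) := by
        rw [hmid, List.eraseIdx_eq_take_drop_succ]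
      have hlen' : (cs.take t ++ cs.drop (t + 1)).length = t + t := by
        simp; omega
      have hne' : cs.take t ++ cs.drop (t + 1) ≠ [] := by
        intro hx
        rw [← List.length_eq_zero_iff] at hx
        omega
      have hmid' : ((cs.take t ++ cs.drop (t + 1)).length - 1) / 2 = t - 1 := by
        rw [hlen']; omega
      have hg1 : (cs.take t ++ cs.drop (t + 1))[t - 1]'(by rw [hlen']; omega)
          = cs[t - 1]'(by omega) := by
        rw [List.getElem_append_left (by rw [hlA]; omega), List.getElem_take]
      have hg2 : (cs.take t ++ cs.drop (t + 1)).drop t = cs.drop (t + 1) := by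
        rw [List.drop_append, hlA]
        have e1 : List.drop t (List.take t cs) = [] :=
          List.drop_eq_nil_of_le (by rw [hlA])
        simp [e1]
      have hg3 : (cs.take t ++ cs.drop (t + 1)).take (t - 1) = cs.take (t - 1) := by
        rw [List.take_append_of_le_length (by rw [hlA]; omega), List.take_take]
        congr 1
        omega
      have hg4 : (cs.take t).reverse = cs[t - 1]'(by omega) :: (cs.take (t - 1)).reverse := by
        obtain ⟨u, rfl⟩ : ∃ u, t = u + 1 := ⟨t - 1, by omega⟩
        show (cs.take (u + 1)).reverse = cs[u]'(by omega) :: (cs.take u).reverse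
        rw [List.take_add_one, List.getElem?_eq_getElem (show u < cs.length by omega)]
        simp
      have hsucc : t - 1 + 1 = t := by omega
      rw [her, midsB, midsB]
      simp only [dif_neg h, dif_neg hne', hmid, hmid', hsucc]
      rw [if_pos (by omega : cs.length % 2 = 1),
          if_neg (by rw [hlen']; omega : ¬ (cs.take t ++ cs.drop (t + 1)).length % 2 = 1)]
      rw [hg1, hg2, hg3, hg4, interR]


theorem midsRec_eq_midsB (cs : List Int) : midsRec cs = midsB cs := by
  fun_induction midsRec cs with
  | case1 => simp [midsB]
  | case2 cs h hm ih =>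
    rw [midsB_step cs h, ← ih]

theorem wcMids_eq (first : Int) (cs : List Int) : wcMids first cs = first :: midsB cs := by
  by_cases h : cs = []
  · subst h; simp [wcMids, midsB]
  · have hk : (cs.length - 1) / 2 < cs.length := by
      cases cs with
      | nil => simp at h
      | cons a t => simp; omega
    rw [wcMids, midsB]
    simp only [if_neg h, dif_neg h]
    rw [PySem.List.pyGet?_natCast, List.getElem?_eq_getElem hk]
    simp [interZ_eq_interR]

theorem loopB_eq (vs : List Int) (s : List Int) (lo hi : Nat)
    (h1 : lo + vs.length ≤ hi + 1) (h2 : hi < s.length) :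
    wcBLoop vs s (lo : Int) (hi : Int) = checkSeq vs ((s.drop lo).take (hi + 1 - lo)) := by
  induction vs generalizing lo hi with
  | nil => rfl
  | cons v vs ih =>
    have hlo : lo ≤ hi := by simp at h1; omega
    have hlos : lo < s.length := by omega
    have harith : hi + 1 - lo = (hi - lo) + 1 := by omega
    have hseg : (s.drop lo).take (hi + 1 - lo)
        = s[lo]'hlos :: (s.drop (lo + 1)).take (hi - lo) := by
      rw [List.drop_eq_getElem_cons hlos, harith, List.take_succ_cons]
    have hlast : ((s.drop lo).take (hi + 1 - lo)).getLast? = some (s[hi]'h2) := by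
      have hlen : ((s.drop lo).take (hi + 1 - lo)).length = hi + 1 - lo := by
        simp; omega
      rw [List.getLast?_eq_getElem?, hlen, List.getElem?_take, if_pos (by omega),
        List.getElem?_drop, show lo + (hi + 1 - lo - 1) = hi from by omega]
      exact List.getElem?_eq_getElem h2
    have hdl : ((s.drop lo).take (hi + 1 - lo)).dropLast = (s.drop lo).take (hi - lo) := by
      rw [List.dropLast_eq_take]
      have hlen : ((s.drop lo).take (hi + 1 - lo)).length = hi + 1 - lo := by
        simp; omega
      rw [hlen, List.take_take, show min (hi + 1 - lo - 1) (hi + 1 - lo) = hi - lo from by omega]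
    have hw : wcBLoop (v :: vs) s (lo : Int) (hi : Int)
        = if v = s[lo]'hlos then wcBLoop vs s ((lo : Int) + 1) (hi : Int)
          else if v = s[hi]'h2 then wcBLoop vs s (lo : Int) ((hi : Int) - 1) else "NO" := by
      rw [wcBLoop, PySem.List.pyGet?_natCast, List.getElem?_eq_getElem hlos,
          PySem.List.pyGet?_natCast, List.getElem?_eq_getElem h2]
    have hc : checkSeq (v :: vs) ((s.drop lo).take (hi + 1 - lo))
        = if v = s[lo]'hlos then checkSeq vs ((s.drop (lo + 1)).take (hi - lo))
          else if v = s[hi]'h2 then checkSeq vs ((s.drop lo).take (hi - lo)) else "NO" := by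
      conv_lhs => rw [hseg, checkSeq]
      rw [← hseg, hlast, hdl]
      simp only [Option.some.injEq]
    rw [hw, hc]
    by_cases hv : v = s[lo]'hlos
    · rw [if_pos hv, if_pos hv,
        show (lo : Int) + 1 = ((lo + 1 : Nat) : Int) from by push_cast; ring,
        ih (lo + 1) hi (by simp at h1 ⊢; omega) h2,
        show hi + 1 - (lo + 1) = hi - lo from by omega]
    · rw [if_neg hv, if_neg hv]
      by_cases hv2 : v = s[hi]'h2
      · rw [if_pos hv2, if_pos hv2]
        cases vs with
        | nil => rfl
        | cons w ws =>
          have hhi : 1 ≤ hi := by simp at h1; omega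
          rw [show (hi : Int) - 1 = ((hi - 1 : Nat) : Int) from by omega,
            ih lo (hi - 1) (by simp at h1 ⊢; omega) (by omega),
            show hi - 1 + 1 - lo = hi - lo from by omega]
      · rw [if_neg hv2, if_neg hv2]

theorem midsRec_length (l : List Int) : (midsRec l).length = l.length := by
  fun_induction midsRec l with
  | case1 => simp
  | case2 l h hm ih =>
    simp only [List.length_cons, ih, List.length_eraseIdx, hm, if_pos]
    omega

theorem pop?_isSome_of_inRange (xs : List Int) (i : Int)
    (h : PySem.Raise.InRange xs.length i) : ∃ r, PySem.List.pop? xs i = some r := by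
  obtain ⟨h1, h2⟩ := h
  unfold PySem.List.pop? PySem.List.pyIdx?
  by_cases hpos : 0 ≤ i
  · rw [if_pos hpos, if_pos h2]
    refine ⟨(xs[i.toNat]'(by omega), xs.eraseIdx i.toNat), ?_⟩
    simp [List.getElem?_eq_getElem (show i.toNat < xs.length by omega)]
  · rw [if_neg hpos, if_pos h1]
    have hlt : xs.length - (-i).toNat < xs.length := by omega
    refine ⟨(xs[xs.length - (-i).toNat]'hlt, xs.eraseIdx (xs.length - (-i).toNat)), ?_⟩
    simp [List.getElem?_eq_getElem hlt]

-- ===== VERDICT (by name: the statement is the Claim_ definition above) =====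
theorem worst_case_spec : Claim_equal_worst_case := by
  intro n l hdom hpre
  obtain ⟨hne, hin⟩ := hpre
  obtain ⟨⟨mid0, l0⟩, hp⟩ := pop?_isSome_of_inRange l (PySem.Int.floordiv (n - 1) 2) hin
  have hl0 : l0.length + 1 = l.length := PySem.List.length_of_pop?_eq_some l hp
  have hlen1 : 1 ≤ l.length := List.length_pos_iff.mpr hne
  have hs : (PySem.List.sorted l (fun x => x) false).length = l.length :=
    PySem.List.length_sorted l (fun x => x) false
  have ha : worst_case n l
      = worstCaseLoopA (l0.length + 1) l0 (PySem.List.sorted l (fun x => x) false) mid0 := by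
    unfold worst_case
    rw [hp]
  have hb : worst_case_alt n l
      = wcBLoop (wcMids mid0 l0).dropLast (PySem.List.sorted l (fun x => x) false) 0
          (((PySem.List.sorted l (fun x => x) false).length : Int) - 1) := by
    unfold worst_case_alt
    rw [hp]
  unfold Spec_worst_case
  rw [ha, hb]
  rw [loopA_eq _ _ _ _ (Nat.lt_succ_self _), wcMids_eq, ← midsRec_eq_midsB]
  have hmlen : ((mid0 :: midsRec l0).dropLast).length = l.length - 1 := by
    simp [midsRec_length]
    omega
  rw [show ((PySem.List.sorted l (fun x => x) false).length : Int) - 1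
      = ((l.length - 1 : Nat) : Int) from by rw [hs]; omega,
    show (0 : Int) = ((0 : Nat) : Int) from rfl,
    loopB_eq _ _ 0 (l.length - 1) (by omega) (by omega)]
  rw [List.drop_zero, show l.length - 1 + 1 - 0 = l.length from by omega, ← hs,
    List.take_length]
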